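-- pv_equiv track=rewrite | github.com/UTD-FAST-Lab/AutoMathIC | src/python/genetic/genetic_fg2.py | get_answer_by_cons_scores
-- ===== SOURCE A (Python) =====
-- from typing import Dict
--
-- def get_answer_by_cons_scores(
--
--     cons_score_dict_over_answers: Dict
-- ):
--     final_ans = list()
--     max_cons_score = max(cons_score_dict_over_answers.values())
--     for ans_per_mod, score in cons_score_dict_over_answers.items():
--         if score==max_cons_score:
--             final_ans.append(ans_per_mod)
--         # end if
--     # end for
--     return final_ans[0]
-- ===== SOURCE B (Python) =====
-- def get_answer_by_cons_scores(cons_score_dict_over_answers):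
--     items = iter(cons_score_dict_over_answers.items())
--     best_key, best_score = next(items)
--     for k, v in items:
--         if v > best_score:
--             best_key, best_score = k, v
--     return best_key
-- ===== Notes on version B (the rewrite author's own statement) =====
-- stated objective: simpler
-- what changed: Single argmax pass tracking the best key/score (strict-greater update keeps the first-seen key) instead of A's two phases of computing the max value and then rescanning to collect all keys with that value.
import Mathlib
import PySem

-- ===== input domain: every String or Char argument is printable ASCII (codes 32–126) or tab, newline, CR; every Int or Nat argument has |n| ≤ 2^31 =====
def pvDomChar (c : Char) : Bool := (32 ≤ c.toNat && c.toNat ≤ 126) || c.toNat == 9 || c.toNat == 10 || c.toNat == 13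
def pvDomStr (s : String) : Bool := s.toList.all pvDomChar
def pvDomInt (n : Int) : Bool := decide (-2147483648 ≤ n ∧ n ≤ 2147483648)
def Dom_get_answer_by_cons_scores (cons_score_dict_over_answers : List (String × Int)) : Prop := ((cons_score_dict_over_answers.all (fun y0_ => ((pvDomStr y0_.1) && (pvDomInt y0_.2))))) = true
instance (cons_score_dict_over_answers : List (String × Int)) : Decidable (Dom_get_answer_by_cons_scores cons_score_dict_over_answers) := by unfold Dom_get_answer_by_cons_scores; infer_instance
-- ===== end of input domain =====

-- B replaces A's two phases (max over values, then rescan collecting ties and take the first) by one argmax pass; same results, Pre_ excludes the empty dict on which A raises ValueError.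

-- ===== PORT A =====
def get_answer_by_cons_scores (cons_score_dict_over_answers : List (String × Int)) : String :=
  let max_cons_score := (PySem.List.max? (cons_score_dict_over_answers.map Prod.snd) (fun x => x)).getD 0
  let final_ans := cons_score_dict_over_answers.foldl
    (fun acc p => if p.2 == max_cons_score then acc ++ [p.1] else acc) ([] : List String)
  (PySem.List.pyGet? final_ans 0).getD ""

-- ===== PORT B =====
def get_answer_by_cons_scores_alt (cons_score_dict_over_answers : List (String × Int)) : String :=
  match cons_score_dict_over_answers with
  | [] => ""
  | p :: t => (t.foldl (fun b q => if q.2 > b.2 then q else b) p).1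

-- ===== PRECONDITION & SPEC =====
-- Pre_ excludes only the empty dict, on which A's max() raises ValueError.
def Pre_get_answer_by_cons_scores (cons_score_dict_over_answers : List (String × Int)) : Prop :=
  cons_score_dict_over_answers ≠ []
instance (cons_score_dict_over_answers : List (String × Int)) : Decidable (Pre_get_answer_by_cons_scores cons_score_dict_over_answers) := by unfold Pre_get_answer_by_cons_scores; infer_instance
def pvWitness_get_answer_by_cons_scores : (List (String × Int)) := [("a", 1), ("b", 1)]
def Spec_get_answer_by_cons_scores (cons_score_dict_over_answers : List (String × Int)) (out : String) : Prop := out = get_answer_by_cons_scores_alt cons_score_dict_over_answers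
instance (cons_score_dict_over_answers : List (String × Int)) (out : String) : Decidable (Spec_get_answer_by_cons_scores cons_score_dict_over_answers out) := by unfold Spec_get_answer_by_cons_scores; infer_instance

-- ===== CLAIM (what is proved, stated in full; the proofs are below) =====
def Claim_equal_get_answer_by_cons_scores : Prop := ∀ (cons_score_dict_over_answers : List (String × Int)), Dom_get_answer_by_cons_scores cons_score_dict_over_answers → Pre_get_answer_by_cons_scores cons_score_dict_over_answers → Spec_get_answer_by_cons_scores cons_score_dict_over_answers (get_answer_by_cons_scores cons_score_dict_over_answers)

-- ===== LEMMAS AND PROOFS =====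
-- the single-pass argmax step of B
def pvStep (b q : String × Int) : String × Int := if q.2 > b.2 then q else b

lemma pvStep_snd (b q : String × Int) : (pvStep b q).2 = max b.2 q.2 := by
  unfold pvStep; split_ifs <;> omega

-- A's "first key with maximal score" is exactly B's running best
lemma first_max_eq_foldl (t : List (String × Int)) (p : String × Int) :
    (((p :: t).filter (fun q => q.2 == (t.map Prod.snd).foldl max p.2)).head?) =
      some (t.foldl pvStep p) := by
  induction t generalizing p with
  | nil => simp
  | cons q t ih =>
    have hle : max p.2 q.2 ≤ (t.map Prod.snd).foldl max (max p.2 q.2) :=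
      (PySem.List.le_foldl_max _ _).1
    have key : (t.map Prod.snd).foldl max (pvStep p q).2 =
        ((q :: t).map Prod.snd).foldl max p.2 := by
      simp [pvStep_snd]
    have := ih (pvStep p q)
    rw [key] at this
    simp only [List.foldl_cons]
    rw [← this]
    by_cases h : q.2 > p.2
    · have hp : p.2 ≠ (t.map Prod.snd).foldl max (max p.2 q.2) := by omega
      simp [pvStep, h, List.filter_cons, hp]
    · by_cases hq : (q.2 == (t.map Prod.snd).foldl max (max p.2 q.2))
      · have hpq : q.2 ≤ p.2 := by omega
        have : p.2 = (t.map Prod.snd).foldl max (max p.2 q.2) := by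
          simp only [beq_iff_eq] at hq; omega
        simp [pvStep, h, List.filter_cons, ← this]
      · by_cases hp : (p.2 == (t.map Prod.snd).foldl max (max p.2 q.2))
        · simp [pvStep, h, List.filter_cons, hp, hq]
        · simp [pvStep, h, List.filter_cons, hp, hq]

-- A's collection loop is filter-then-map (specialised form of PySem.List.foldl_append_if)
lemma append_if_filter (m : Int) (l : List (String × Int)) (acc : List String) :
    l.foldl (fun acc p => if p.2 == m then acc ++ [p.1] else acc) acc =
      acc ++ (l.filter (fun p => p.2 == m)).map Prod.fst := by
  induction l generalizing acc with
  | nil => simp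
  | cons p t ih =>
    simp only [List.foldl_cons, List.filter_cons]
    by_cases h : (p.2 == m) = true <;>
      simp only [h, if_true, if_false, Bool.false_eq_true, ih, List.map_cons] <;> simp

lemma pyGet?_zero (xs : List String) : PySem.List.pyGet? xs 0 = xs.head? := by
  cases xs <;> simp [PySem.List.pyGet?, PySem.List.pyIdx?]

-- ===== VERDICT (by name: the statement is the Claim_ definition above) =====
theorem get_answer_by_cons_scores_spec : Claim_equal_get_answer_by_cons_scores := by
  intro l _ hpre
  unfold Spec_get_answer_by_cons_scores
  match l, hpre with
  | p :: t, _ =>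
    unfold get_answer_by_cons_scores get_answer_by_cons_scores_alt
    have hfst := first_max_eq_foldl t p
    simp only [List.map_cons, PySem.List.max?_id_cons, Option.getD_some, append_if_filter,
      List.nil_append, pyGet?_zero, List.head?_map, hfst, Option.map_some]
    rfl
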